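-- pv_equiv track=rewrite | github.com/piriyaraj/TechFarm-Pages | Backend/CommonTools/Facebook/TamilCineWorld.py | makeTextFixed
-- ===== SOURCE A (Python) =====
-- def makeTextFixed(text):
--     newText=""
--     code=0
--     for i in range(len(text)):
--
--         if(i==60):
--            code=1
--         if(code == 1 and text[i]==" "):
--             newText = newText+ "\n"
--             code = 0
--             continue
--         newText = newText+text[i]
--     return newText
-- ===== SOURCE B (Python) =====
-- def makeTextFixed(text):
--     idx = text.find(" ", 60)
--     if idx == -1:
--         return text
--     return text[:idx] + "\n" + text[idx + 1:]
-- ===== Notes on version B (the rewrite author's own statement) =====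
-- stated objective: faster
-- what changed: Replaced the character-by-character accumulating loop with its flag state by a single str.find of a space starting at index 60 followed by slicing to splice in the newline.
import Mathlib
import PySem

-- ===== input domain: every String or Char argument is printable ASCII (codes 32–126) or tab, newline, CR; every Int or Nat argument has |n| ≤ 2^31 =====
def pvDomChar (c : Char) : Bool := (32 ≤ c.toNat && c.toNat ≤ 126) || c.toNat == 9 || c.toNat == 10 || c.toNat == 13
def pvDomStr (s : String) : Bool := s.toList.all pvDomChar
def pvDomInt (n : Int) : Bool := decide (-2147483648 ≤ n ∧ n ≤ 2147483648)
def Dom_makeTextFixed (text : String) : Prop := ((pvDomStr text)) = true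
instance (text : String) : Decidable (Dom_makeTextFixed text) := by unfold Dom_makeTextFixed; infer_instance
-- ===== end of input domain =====

-- B replaces A's character-by-character accumulating loop (with a flag) by one find(' ', 60) plus slicing; equal output on every input.

-- ===== PORT A =====
-- the loop body of A: sets code at i == 60, replaces the space and clears code, else copies the character
def mtfStep (cs : List Char) (st : List Char × Int) (i : Int) : List Char × Int :=
  let code : Int := if i = 60 then 1 else st.2
  if code = 1 ∧ PySem.List.pyGetD cs i ' ' = ' ' then (st.1 ++ ['\n'], 0)
  else (st.1 ++ [PySem.List.pyGetD cs i ' '], code)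

def makeTextFixed (text : String) : String :=
  String.ofList
    (((PySem.List.pyRange 0 (PySem.Str.len text) 1).foldl (mtfStep text.toList) ([], 0)).1)

-- ===== PORT B =====
def makeTextFixed_alt (text : String) : String :=
  let idx := PySem.Str.findFrom text " " 60
  if idx = -1 then text
  else
    String.ofList
      (PySem.Chars.slice text.toList none (some idx) ++
        '\n' :: PySem.Chars.slice text.toList (some (idx + 1)) none)

-- ===== PRECONDITION & SPEC =====
def Spec_makeTextFixed (text : String) (out : String) : Prop := out = makeTextFixed_alt text
instance (text : String) (out : String) : Decidable (Spec_makeTextFixed text out) := by unfold Spec_makeTextFixed; infer_instance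

-- ===== CLAIM (what is proved, stated in full; the proofs are below) =====
def Claim_equal_makeTextFixed : Prop := ∀ (text : String), Dom_makeTextFixed text → Spec_makeTextFixed text (makeTextFixed text)

-- ===== LEMMAS AND PROOFS =====

-- what A's loop does to the suffix after index 60: replace the first space by a newline
def mtfRep : List Char → List Char
  | [] => []
  | c :: t => if c = ' ' then '\n' :: t else c :: mtfRep t

lemma mtfRep_no_space (l : List Char) (h : ' ' ∉ l) : mtfRep l = l := by
  induction l with
  | nil => rfl
  | cons c t ih =>
    simp only [List.mem_cons, not_or] at h
    simp [mtfRep, Ne.symm h.1, ih h.2]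

lemma mtfRep_first_space (l : List Char) (m : Nat) (hm : m < l.length)
    (hs : l[m] = ' ') (hmin : ∀ i (hi : i < m) (hil : i < l.length), l[i] ≠ ' ') :
    mtfRep l = l.take m ++ '\n' :: l.drop (m + 1) := by
  induction l generalizing m with
  | nil => simp at hm
  | cons c t ih =>
    cases m with
    | zero => simp at hs; simp [mtfRep, hs]
    | succ m' =>
      have hc : c ≠ ' ' := by
        have := hmin 0 (Nat.succ_pos _) (by simp)
        simpa using this
      simp only [List.length_cons, Nat.succ_lt_succ_iff] at hm
      simp only [List.getElem_cons_succ] at hs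
      have := ih m' hm hs (fun i hi hil => by
        have := hmin (i + 1) (Nat.succ_lt_succ hi) (by simpa using Nat.succ_lt_succ hil)
        simpa using this)
      simp [mtfRep, hc, this]

-- the copying phase: code is 0 and no index in the block equals 60
lemma mtf_loop0 (cs : List Char) (m : Nat) : ∀ (k : Nat) (acc : List Char),
    k + m ≤ cs.length → (k + m ≤ 60 ∨ 60 < k) →
    ((List.range' k m).map (Nat.cast : Nat → Int)).foldl (mtfStep cs) (acc, 0)
      = (acc ++ (cs.drop k).take m, 0) := by
  induction m with
  | zero => intro k acc _ _; simp
  | succ m ih =>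
    intro k acc hlen hk
    have hklt : k < cs.length := by omega
    have hk60 : ((k : Int) = 60) = False := by
      simp only [eq_iff_iff, iff_false]; omega
    have hstep : mtfStep cs (acc, 0) (k : Int) = (acc ++ [cs[k]], 0) := by
      simp [mtfStep, hk60, PySem.List.pyGetD_natCast, List.getD_eq_getElem?_getD,
        List.getElem?_eq_getElem hklt]
    rw [List.range'_succ, List.map_cons, List.foldl_cons, hstep,
      ih (k + 1) (acc ++ [cs[k]]) (by omega) (by omega)]
    rw [List.drop_eq_getElem_cons hklt, List.take_succ_cons]
    simp

-- the search phase: code is 1, every index is ≥ 60, the block reaches the end of the string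
lemma mtf_loop1 (cs : List Char) (m : Nat) : ∀ (k : Nat) (acc : List Char),
    k + m = cs.length → 60 ≤ k →
    (((List.range' k m).map (Nat.cast : Nat → Int)).foldl (mtfStep cs) (acc, 1)).1
      = acc ++ mtfRep (cs.drop k) := by
  induction m with
  | zero => intro k acc hlen _; simp [List.drop_of_length_le (by omega : cs.length ≤ k), mtfRep]
  | succ m ih =>
    intro k acc hlen hk
    have hklt : k < cs.length := by omega
    have hdrop := List.drop_eq_getElem_cons hklt
    by_cases hsp : cs[k] = ' '
    · have hstep : mtfStep cs (acc, 1) (k : Int) = (acc ++ ['\n'], 0) := by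
        simp [mtfStep, PySem.List.pyGetD_natCast, List.getD_eq_getElem?_getD,
          List.getElem?_eq_getElem hklt, hsp]
      rw [List.range'_succ, List.map_cons, List.foldl_cons, hstep,
        mtf_loop0 cs m (k + 1) (acc ++ ['\n']) (by omega) (by omega)]
      have : (cs.drop (k + 1)).take m = cs.drop (k + 1) := by
        apply List.take_of_length_le; simp; omega
      rw [hdrop]
      simp only [mtfRep, if_pos hsp, this]
      simp
    · have hstep : mtfStep cs (acc, 1) (k : Int) = (acc ++ [cs[k]], 1) := by
        simp [mtfStep, PySem.List.pyGetD_natCast, List.getD_eq_getElem?_getD,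
          List.getElem?_eq_getElem hklt, hsp]
      rw [List.range'_succ, List.map_cons, List.foldl_cons, hstep,
        ih (k + 1) (acc ++ [cs[k]]) (by omega) (by omega)]
      rw [hdrop]
      simp only [mtfRep, if_neg hsp]
      simp

-- at index 60 the incoming flag value is irrelevant: the loop body sets it
lemma mtfStep_60 (cs : List Char) (acc : List Char) (c : Int) :
    mtfStep cs (acc, c) 60 = mtfStep cs (acc, 1) 60 := by simp [mtfStep]

lemma drop_drop_shift (cs : List Char) (M : Nat) (h : 60 ≤ M) :
    List.drop (M - 60 + 1) (List.drop 60 cs) = List.drop (M + 1) cs := by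
  rw [List.drop_drop]
  congr 1
  omega

lemma singleton_prefix_head? (l : List Char) (x : Char) : [x] <+: l ↔ l.head? = some x := by
  cases l with
  | nil => simp
  | cons c t => constructor
                · rintro ⟨u, hu⟩; simp at hu; simp [hu.1]
                · intro h; simp at h; exact ⟨t, by simp [h]⟩

-- A's result in closed form
lemma makeTextFixed_closed (text : String) :
    makeTextFixed text
      = String.ofList (text.toList.take 60 ++ mtfRep (text.toList.drop 60)) := by
  unfold makeTextFixed
  have hlen : PySem.Str.len text = (text.toList.length : Int) := by
    simp [PySem.Str.len_eq]
  rw [hlen, PySem.List.pyRange_zero_natCast]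
  set cs := text.toList with hcs
  by_cases hn : cs.length ≤ 60
  · have h0 := mtf_loop0 cs cs.length 0 [] (le_of_eq (Nat.zero_add _))
      (show 0 + cs.length ≤ 60 ∨ 60 < 0 from Or.inl (by omega))
    rw [List.range_eq_range', h0]
    simp [List.drop_of_length_le hn, mtfRep, List.take_of_length_le hn]
  · push_neg at hn
    obtain ⟨m, hm⟩ : ∃ m, cs.length - 60 = m + 1 := ⟨cs.length - 61, by omega⟩
    have happ := List.range'_append_1 (s := 0) (m := 60) (n := m + 1)
    have hsplit : List.range cs.length = List.range' 0 60 ++ List.range' 60 (m + 1) := by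
      rw [List.range_eq_range', show cs.length = 60 + (m + 1) from by omega]
      simpa using happ.symm
    rw [hsplit, List.map_append, List.foldl_append,
      mtf_loop0 cs 60 0 [] (by omega) (Or.inl (by omega))]
    have h60 : ((60 : Nat) : Int) = (60 : Int) := by norm_num
    rw [List.range'_succ, List.map_cons, List.foldl_cons, h60,
      mtfStep_60 cs (([] : List Char) ++ (cs.drop 0).take 60) 0]
    have hrest := mtf_loop1 cs (m + 1) 60 (([] : List Char) ++ (cs.drop 0).take 60)
      (by omega) (by omega)
    rw [List.range'_succ, List.map_cons, List.foldl_cons, h60] at hrest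
    rw [hrest]
    simp

-- ===== VERDICT (by name: the statement is the Claim_ definition above) =====
theorem makeTextFixed_spec : Claim_equal_makeTextFixed := by
  intro text _
  unfold Spec_makeTextFixed makeTextFixed_alt
  rw [makeTextFixed_closed]
  set cs := text.toList with hcs
  have hsub : (" " : String).toList = [' '] := by decide
  rw [PySem.Str.findFrom_eq, ← hcs, hsub]
  by_cases hn : cs.length ≤ 60
  · -- no index reaches 60: A copies the string; B's find returns -1
    have hfind : PySem.Chars.findFrom cs [' '] 60 = -1 := by
      have hf0 : PySem.Chars.find ([] : List Char) [' '] = -1 := by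
        rw [PySem.Chars.find_eq_neg_one_iff]
        intro h
        have := h.sublist.length_le
        simp at this
      by_cases h : (cs.length : Int) < 60
      · simp [PySem.Chars.findFrom, h]
      · have hlen60 : cs.length = 60 := by omega
        have hnil : List.drop (60 : Nat) (List.take (60 : Nat) cs) = [] :=
          List.drop_eq_nil_of_le (by simp)
        simp [PySem.Chars.findFrom, hlen60, hnil, hf0]
    rw [hfind, if_pos rfl]
    have : ' ' ∉ cs.drop 60 := by simp [List.drop_of_length_le hn]
    rw [mtfRep_no_space _ this, List.take_append_drop, hcs, String.ofList_toList]
  · push_neg at hn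
    have h60 : (60 : Int) = ((60 : Nat) : Int) := by norm_num
    have hle : (60 : Nat) ≤ cs.length := by omega
    by_cases hf : PySem.Chars.findFrom cs [' '] 60 = -1
    · -- no space at or after 60: both return the original string
      rw [hf, if_pos rfl]
      have hno : ¬ [' '] <:+: cs.drop 60 := by
        rw [← PySem.Chars.findFrom_natCast_eq_neg_one_iff cs [' '] 60 hle, ← h60]; exact hf
      have : ' ' ∉ cs.drop 60 := by
        intro hmem; exact hno ((List.singleton_infix_iff _ _).mpr hmem)
      rw [mtfRep_no_space _ this, List.take_append_drop, hcs, String.ofList_toList]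
    · -- a space exists: B splices at the index find returned
      rw [if_neg hf]
      have hf' : PySem.Chars.findFrom cs [' '] ((60 : Nat) : Int) ≠ -1 := by rw [← h60]; exact hf
      obtain ⟨hge, hpre, hmin⟩ := PySem.Chars.findFrom_natCast_spec cs [' '] 60 hle hf'
      rw [← h60] at hge hpre hmin
      set idx := PySem.Chars.findFrom cs [' '] 60 with hidx
      have hge0 : (0 : Int) ≤ idx := le_trans (by norm_num) hge
      set M := idx.toNat with hM
      have hMge : 60 ≤ M := by omega
      have hMlt : M < cs.length := by
        by_contra hc
        push_neg at hc
        rw [singleton_prefix_head?, List.head?_drop, List.getElem?_eq_none hc] at hpre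
        simp at hpre
      have hsM : cs[M] = ' ' := by
        rw [singleton_prefix_head?, List.head?_drop, List.getElem?_eq_getElem hMlt] at hpre
        exact Option.some.inj hpre
      have hminM : ∀ i (hi : i < M) (hil : i < cs.length), 60 ≤ i → cs[i] ≠ ' ' := by
        intro i hi hil h60i hsp
        exact hmin i h60i hi (by
          rw [singleton_prefix_head?, List.head?_drop, List.getElem?_eq_getElem hil, hsp])
      -- rewrite A's suffix using the first-space characterisation on cs.drop 60
      have hrep : mtfRep (cs.drop 60) = (cs.drop 60).take (M - 60) ++ '\n' :: (cs.drop 60).drop (M - 60 + 1) := by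
        refine mtfRep_first_space (cs.drop 60) (M - 60) (by simp; omega) ?_ ?_
        · rw [List.getElem_drop]
          have h6M : 60 + (M - 60) = M := by omega
          simp only [h6M]; exact hsM
        · intro i hi hil
          have hil' : 60 + i < cs.length := by simp at hil; omega
          rw [List.getElem_drop]
          exact hminM (60 + i) (by omega) hil' (by omega)
      rw [hrep]
      -- B's slices
      have hsl1 : PySem.Chars.slice cs none (some idx) = cs.take idx.toNat :=
        PySem.List.slice_to cs hge0
      have hsl2 : PySem.Chars.slice cs (some (idx + 1)) none = cs.drop (idx + 1).toNat :=
        PySem.List.slice_from cs (by omega : (0:Int) ≤ idx + 1)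
      rw [hsl1, hsl2]
      have h1 : (idx + 1).toNat = M + 1 := by omega
      rw [h1]
      have hM60 : 60 + (M - 60) = M := by omega
      have hdd : List.drop (M - 60 + 1) (List.drop 60 cs) = List.drop (M + 1) cs :=
        drop_drop_shift cs M hMge
      rw [← List.append_assoc, ← List.take_add, hM60, hdd, hM]
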